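-- pv_equiv track=rewrite | github.com/xianghuisun/U-CKGQA | tools.py | rule2_for_find_ner
-- ===== SOURCE A (Python) =====
-- def rule2_for_find_ner(topic_entity,question,sub_map,alias_map):
--     '''
--     以topic_entity为终止点，往左边找
--     '''
--     assert topic_entity in question
--     start_idx=question.find(topic_entity)
--     end_idx=start_idx+len(topic_entity)
--     for i in range(0,start_idx+1):
--         if question[i:end_idx] in sub_map or question[i:end_idx] in alias_map:
--             topic_entity=question[i:end_idx]
--             break
--
--     return topic_entity
-- ===== SOURCE B (Python) =====
-- def rule2_for_find_ner(topic_entity, question, sub_map, alias_map):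
--     # Iterate over the dictionary keys instead of scanning start positions:
--     # accept a key iff it is a suffix of question[:end_idx] no shorter than
--     # topic_entity; keep the longest accepted key.
--     end_idx = question.find(topic_entity) + len(topic_entity)
--     prefix = question[:end_idx]
--     best = topic_entity
--     best_len = len(topic_entity) - 1
--     for k in list(sub_map) + list(alias_map):
--         if best_len < len(k) <= end_idx and prefix.endswith(k):
--             best = k
--             best_len = len(k)
--     return best
-- ===== Notes on version B (the rewrite author's own statement) =====
-- stated objective: alternative
-- what changed: Instead of scanning start positions i=0..start_idx and slicing question[i:end_idx] until a slice is a dict key, B computes prefix=question[:end_idx] once and scans the keys of sub_map and alias_map, keeping the longest key k with len(topic_entity) <= len(k) <= end_idx that prefix.endswith(k); the longest accepted suffix equals A's first (leftmost) matching slice.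
import Mathlib
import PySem

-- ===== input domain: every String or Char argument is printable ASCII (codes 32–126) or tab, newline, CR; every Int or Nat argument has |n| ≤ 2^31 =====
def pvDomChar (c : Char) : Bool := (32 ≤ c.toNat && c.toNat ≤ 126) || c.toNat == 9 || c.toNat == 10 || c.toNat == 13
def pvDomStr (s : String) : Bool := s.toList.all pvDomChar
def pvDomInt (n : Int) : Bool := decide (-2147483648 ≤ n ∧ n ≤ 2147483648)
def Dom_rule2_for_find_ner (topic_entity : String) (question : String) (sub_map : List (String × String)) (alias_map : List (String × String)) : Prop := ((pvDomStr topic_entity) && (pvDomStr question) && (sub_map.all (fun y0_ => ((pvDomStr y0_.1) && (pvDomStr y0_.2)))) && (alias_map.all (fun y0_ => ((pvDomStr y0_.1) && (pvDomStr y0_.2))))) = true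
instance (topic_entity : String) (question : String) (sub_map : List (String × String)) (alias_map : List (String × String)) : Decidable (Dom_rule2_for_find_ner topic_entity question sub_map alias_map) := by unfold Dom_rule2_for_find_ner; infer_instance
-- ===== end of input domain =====

-- B scans the dictionaries' keys for the longest suffix of question[:end_idx] (no shorter than
-- topic_entity) instead of A's scan over start positions; alternative decomposition, not claimed faster.

-- ===== PORT A =====
-- dict membership 'x in m' on the association list: some key equals x
def pvMemKeys (m : List (String × String)) (x : String) : Bool := m.any (fun p => p.1 == x)

-- the 'for i in range(0, start_idx+1): … break' loop, with early return on the first match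
def pvRuleALoop (question : String) (end_idx : Int) (sub_map alias_map : List (String × String)) (topic_entity : String) : List Int → String
  | [] => topic_entity
  | i :: rest =>
    let s := PySem.Str.slice question (some i) (some end_idx)
    if (pvMemKeys sub_map s || pvMemKeys alias_map s) = true then s
    else pvRuleALoop question end_idx sub_map alias_map topic_entity rest

def rule2_for_find_ner (topic_entity : String) (question : String) (sub_map : List (String × String)) (alias_map : List (String × String)) : String :=
  let start_idx := PySem.Str.find question topic_entity
  let end_idx := start_idx + PySem.Str.len topic_entity
  pvRuleALoop question end_idx sub_map alias_map topic_entity (PySem.List.pyRange 0 (start_idx + 1) 1)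

-- ===== PORT B =====
-- the 'for k in list(sub_map) + list(alias_map)' loop, keeping the longest accepted key
def pvRuleBLoop (pre : String) (end_idx : Int) : List String → String × Int → String × Int
  | [], acc => acc
  | k :: rest, acc =>
    pvRuleBLoop pre end_idx rest
      (if acc.2 < PySem.Str.len k ∧ PySem.Str.len k ≤ end_idx ∧ PySem.Str.endswith pre k = true
       then (k, PySem.Str.len k) else acc)

def rule2_for_find_ner_alt (topic_entity : String) (question : String) (sub_map : List (String × String)) (alias_map : List (String × String)) : String :=
  let end_idx := PySem.Str.find question topic_entity + PySem.Str.len topic_entity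
  let pre := PySem.Str.slice question none (some end_idx)
  (pvRuleBLoop pre end_idx (sub_map.map Prod.fst ++ alias_map.map Prod.fst)
      (topic_entity, PySem.Str.len topic_entity - 1)).1

-- ===== PRECONDITION & SPEC =====
-- Pre_ excludes exactly the inputs on which A's 'assert topic_entity in question' raises AssertionError.
def Pre_rule2_for_find_ner (topic_entity : String) (question : String) (sub_map : List (String × String)) (alias_map : List (String × String)) : Prop :=
  PySem.Str.isIn topic_entity question = true
instance (topic_entity : String) (question : String) (sub_map : List (String × String)) (alias_map : List (String × String)) : Decidable (Pre_rule2_for_find_ner topic_entity question sub_map alias_map) := by unfold Pre_rule2_for_find_ner; infer_instance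

def pvWitness_rule2_for_find_ner : String × String × (List (String × String)) × (List (String × String)) :=
  ("ab", "cab?", [("cab", "x")], [("b", "y")])

def Spec_rule2_for_find_ner (topic_entity : String) (question : String) (sub_map : List (String × String)) (alias_map : List (String × String)) (out : String) : Prop := out = rule2_for_find_ner_alt topic_entity question sub_map alias_map
instance (topic_entity : String) (question : String) (sub_map : List (String × String)) (alias_map : List (String × String)) (out : String) : Decidable (Spec_rule2_for_find_ner topic_entity question sub_map alias_map out) := by unfold Spec_rule2_for_find_ner; infer_instance

-- ===== CLAIM (what is proved, stated in full; the proofs are below) =====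
def Claim_equal_rule2_for_find_ner : Prop := ∀ (topic_entity : String) (question : String) (sub_map : List (String × String)) (alias_map : List (String × String)), Dom_rule2_for_find_ner topic_entity question sub_map alias_map → Pre_rule2_for_find_ner topic_entity question sub_map alias_map → Spec_rule2_for_find_ner topic_entity question sub_map alias_map (rule2_for_find_ner topic_entity question sub_map alias_map)


-- ===== LEMMAS AND PROOFS =====

-- proof-side reference scan: first j in [a, a+fuel) with memb (F j), else dflt
def pvAux (memb : String → Bool) (F : Nat → String) (dflt : String) : Nat → Nat → String
  | 0, _ => dflt
  | fuel + 1, a => if memb (F a) then F a else pvAux memb F dflt fuel (a + 1)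

theorem pvAux_none (memb : String → Bool) (F : Nat → String) (dflt : String) (n : Nat)
    (h : ∀ j, j ≤ n → memb (F j) = false) :
    ∀ (fuel a : Nat), a + fuel = n + 1 → pvAux memb F dflt fuel a = dflt := by
  intro fuel
  induction fuel with
  | zero => intro a _; rfl
  | succ f ih =>
    intro a ha
    simp only [pvAux, h a (by omega)]
    simp only [Bool.false_eq_true, if_false]
    exact ih (a + 1) (by omega)

theorem pvAux_first (memb : String → Bool) (F : Nat → String) (dflt : String) (n j0 : Nat)
    (hj0 : j0 ≤ n) (hmem : memb (F j0) = true) (hlt : ∀ j, j < j0 → memb (F j) = false) :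
    ∀ (fuel a : Nat), a + fuel = n + 1 → a ≤ j0 → pvAux memb F dflt fuel a = F j0 := by
  intro fuel
  induction fuel with
  | zero => intro a ha hale; omega
  | succ f ih =>
    intro a ha hale
    by_cases hc : a = j0
    · subst hc; simp only [pvAux, hmem, if_true]
    · simp only [pvAux, hlt a (by omega), Bool.false_eq_true, if_false]
      exact ih (a + 1) (by omega) (by omega)

-- A's loop over pyRange a (n+1) 1 is pvAux with fuel n+1-a
theorem pvALoop_eq_aux (q : String) (sub al : List (String × String)) (te : String) (n : Nat) (e : Int) :
    ∀ (fuel a : Nat), a + fuel = n + 1 →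
    pvRuleALoop q e sub al te (PySem.List.pyRange (a : Int) ((n : Int) + 1) 1)
      = pvAux (fun x => pvMemKeys sub x || pvMemKeys al x)
          (fun j => PySem.Str.slice q (some (j : Int)) (some e)) te fuel a := by
  intro fuel
  induction fuel with
  | zero =>
    intro a ha
    rw [PySem.List.pyRange_one_eq_nil (by omega : ((n : Int) + 1) ≤ (a : Int))]
    rfl
  | succ f ih =>
    intro a ha
    rw [PySem.List.pyRange_one_cons (by omega : (a : Int) < (n : Int) + 1)]
    simp only [pvRuleALoop, pvAux]
    split
    · rfl
    · have hc : ((a : Int) + 1) = (((a + 1 : Nat)) : Int) := by push_cast; ring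
      rw [hc]
      exact ih (a + 1) (by omega)

-- B's loop invariant: the result is the initial accumulator or an accepted key of maximal length
theorem pvBLoop_inv (pre : String) (e : Int) :
    ∀ (ks : List String) (b : String) (l : Int),
    (pvRuleBLoop pre e ks (b, l) = (b, l) ∨
      ∃ k ∈ ks, (l < PySem.Str.len k ∧ PySem.Str.len k ≤ e ∧ PySem.Str.endswith pre k = true) ∧
        pvRuleBLoop pre e ks (b, l) = (k, PySem.Str.len k)) ∧
    l ≤ (pvRuleBLoop pre e ks (b, l)).2 ∧
    ∀ k ∈ ks, PySem.Str.len k ≤ e → PySem.Str.endswith pre k = true →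
      PySem.Str.len k ≤ (pvRuleBLoop pre e ks (b, l)).2 := by
  intro ks
  induction ks with
  | nil => intro b l; simp [pvRuleBLoop]
  | cons k rest ih =>
    intro b l
    simp only [pvRuleBLoop]
    by_cases hc : l < PySem.Str.len k ∧ PySem.Str.len k ≤ e ∧ PySem.Str.endswith pre k = true
    · rw [if_pos hc]
      obtain ⟨ihd, ihm, ihb⟩ := ih k (PySem.Str.len k)
      refine ⟨?_, le_trans (le_of_lt hc.1) ihm, ?_⟩
      · rcases ihd with heq | ⟨k', hk', ⟨h1, h2, h3⟩, heq⟩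
        · exact Or.inr ⟨k, List.mem_cons_self, hc, heq⟩
        · exact Or.inr ⟨k', List.mem_cons_of_mem _ hk', ⟨lt_trans hc.1 h1, h2, h3⟩, heq⟩
      · intro k' hk' hle hend
        rcases List.mem_cons.mp hk' with rfl | hk'
        · exact ihm
        · exact ihb k' hk' hle hend
    · rw [if_neg hc]
      obtain ⟨ihd, ihm, ihb⟩ := ih b l
      refine ⟨?_, ihm, ?_⟩
      · rcases ihd with heq | ⟨k', hk', hg, heq⟩
        · exact Or.inl heq
        · exact Or.inr ⟨k', List.mem_cons_of_mem _ hk', hg, heq⟩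
      · intro k' hk' hle hend
        rcases List.mem_cons.mp hk' with rfl | hk'
        · have : ¬ l < PySem.Str.len k' := fun h => hc ⟨h, hle, hend⟩
          exact le_trans (not_lt.mp this) ihm
        · exact ihb k' hk' hle hend

set_option maxHeartbeats 1000000 in
theorem rule2_core (te q : String) (sub al : List (String × String))
    (hin : PySem.Str.isIn te q = true) :
    rule2_for_find_ner te q sub al = rule2_for_find_ner_alt te q sub al := by
  have hinf : te.toList <:+: q.toList := (PySem.Str.isIn_iff_infix te q).mp hin
  have hnn : 0 ≤ PySem.Chars.find q.toList te.toList :=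
    (PySem.Chars.find_nonneg_iff q.toList te.toList).mpr hinf
  set n : Nat := (PySem.Chars.find q.toList te.toList).toNat with hndef
  have hfind : PySem.Chars.find q.toList te.toList = (n : Int) := (Int.toNat_of_nonneg hnn).symm
  obtain ⟨hpref, hmin⟩ := PySem.Chars.find_spec hnn
  have hnle : n ≤ q.toList.length := by
    have := PySem.Chars.find_le_length q.toList te.toList
    omega
  set L : Nat := te.toList.length with hLdef
  set e : Nat := n + L with hedef
  have heQ : e ≤ q.toList.length := by
    have h1 := hpref.length_le
    simp only [List.length_drop] at h1
    omega
  set memb : String → Bool := fun x => pvMemKeys sub x || pvMemKeys al x with hmembdef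
  set F : Nat → String := fun j => PySem.Str.slice q (some (j : Int)) (some ((e : Nat) : Int)) with hFdef
  set K : List String := sub.map Prod.fst ++ al.map Prod.fst with hKdef
  set pre : String := PySem.Str.slice q none (some ((e : Nat) : Int)) with hpredef
  -- the shared end index
  have hE : PySem.Str.find q te + PySem.Str.len te = ((e : Nat) : Int) := by
    rw [PySem.Str.find_eq, PySem.Str.len_eq, hfind]
    push_cast [hedef]
    ring
  -- A unfolds to the reference scan
  have hA : rule2_for_find_ner te q sub al = pvAux memb F te (n + 1) 0 := by
    show pvRuleALoop q _ sub al te _ = _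
    rw [hE]
    have h0 : ((0 : Nat) : Int) = (0 : Int) := rfl
    have hr : PySem.Str.find q te + 1 = (n : Int) + 1 := by
      rw [PySem.Str.find_eq, hfind]
    rw [hr, ← h0]
    exact pvALoop_eq_aux q sub al te n ((e : Nat) : Int) (n + 1) 0 (by omega)
  -- B unfolds to the key loop
  have hB : rule2_for_find_ner_alt te q sub al
      = (pvRuleBLoop pre ((e : Nat) : Int) K (te, (L : Int) - 1)).1 := by
    show (pvRuleBLoop _ _ _ (te, PySem.Str.len te - 1)).1 = _
    rw [hE, PySem.Str.len_eq, ← hLdef]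
  -- slices of q
  have hP : pre.toList = q.toList.take e := by
    rw [hpredef, PySem.Str.toList_slice, PySem.Chars.slice_eq_listSlice,
      PySem.List.slice_to_natCast]
  have hPlen : pre.toList.length = e := by
    rw [hP, List.length_take]
    omega
  have hFj : ∀ j : Nat, (F j).toList = (q.toList.drop j).take (e - j) := by
    intro j
    rw [hFdef]
    simp only []
    rw [PySem.Str.toList_slice, PySem.Chars.slice_eq_listSlice, PySem.List.slice_natCast]
  have hFlen : ∀ j : Nat, j ≤ n → (F j).toList.length = e - j := by
    intro j hj
    rw [hFj, List.length_take, List.length_drop]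
    omega
  have hEndF : ∀ j : Nat, j ≤ n → PySem.Str.endswith pre (F j) = true := by
    intro j hj
    rw [PySem.Str.endswith_eq, PySem.Chars.endswith_iff, hP, hFj]
    refine ⟨q.toList.take j, ?_⟩
    rw [← List.take_add]
    congr 1
    omega
  have hLenFI : ∀ j : Nat, j ≤ n → PySem.Str.len (F j) = ((e - j : Nat) : Int) := by
    intro j hj
    rw [PySem.Str.len_eq, hFlen j hj]
  -- membership
  have hmembK : ∀ x : String, memb x = true ↔ x ∈ K := by
    intro x
    simp only [hmembdef, pvMemKeys, hKdef, Bool.or_eq_true, List.any_eq_true, beq_iff_eq,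
      List.mem_append, List.mem_map]
  -- accepted keys are left-extended slices
  have hbwd : ∀ k : String, k.toList.length ≤ e → PySem.Str.endswith pre k = true →
      L ≤ k.toList.length → k = F (e - k.toList.length) ∧ e - k.toList.length ≤ n := by
    intro k hke hend hLk
    have hsuf : k.toList <:+ pre.toList := by
      rw [PySem.Str.endswith_eq, PySem.Chars.endswith_iff] at hend
      exact hend
    obtain ⟨t, ht⟩ := hsuf
    have htlen : t.length = e - k.toList.length := by
      have := congrArg List.length ht
      simp only [List.length_append, hPlen] at this
      omega
    have hdrop : pre.toList.drop t.length = k.toList := by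
      rw [← ht, List.drop_left]
    rw [hP, List.drop_take] at hdrop
    have hk : k.toList = (F (e - k.toList.length)).toList := by
      rw [hFj, ← htlen]
      exact hdrop.symm
    exact ⟨String.toList_inj.mp hk, by omega⟩
  -- run B's invariant
  obtain ⟨hd, hm, hb⟩ := pvBLoop_inv pre ((e : Nat) : Int) K te ((L : Int) - 1)
  rcases hd with heq | ⟨k0, hk0K, ⟨hgt, hle, hend⟩, heq⟩
  · -- no key accepted: both return te
    have hnone : ∀ j, j ≤ n → memb (F j) = false := by
      intro j hj
      cases hmb : memb (F j) with
      | false => rfl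
      | true =>
        exfalso
        have hK : F j ∈ K := (hmembK (F j)).mp hmb
        have h1 := hb (F j) hK (by rw [hLenFI j hj]; exact_mod_cast (by omega : (e - j : Nat) ≤ e))
          (hEndF j hj)
        rw [hLenFI j hj, heq] at h1
        simp only [] at h1
        omega
    rw [hA, hB, heq, pvAux_none memb F te n hnone (n + 1) 0 (by omega)]
  · -- k0 is the longest accepted key; A's first match is the same slice
    have hL0 : L ≤ k0.toList.length := by
      rw [PySem.Str.len_eq] at hgt
      omega
    have hleN : k0.toList.length ≤ e := by
      rw [PySem.Str.len_eq] at hle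
      exact_mod_cast hle
    obtain ⟨hk0F, hj0n⟩ := hbwd k0 hleN hend hL0
    set j0 : Nat := e - k0.toList.length with hj0def
    have hmembj0 : memb (F j0) = true := by
      rw [← hk0F]
      exact (hmembK k0).mpr hk0K
    have hminj : ∀ j, j < j0 → memb (F j) = false := by
      intro j hj
      cases hmb : memb (F j) with
      | false => rfl
      | true =>
        exfalso
        have hK : F j ∈ K := (hmembK (F j)).mp hmb
        have h1 := hb (F j) hK
          (by rw [hLenFI j (by omega)]; exact_mod_cast (by omega : (e - j : Nat) ≤ e))
          (hEndF j (by omega))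
        rw [hLenFI j (by omega), heq] at h1
        simp only [PySem.Str.len_eq] at h1
        omega
    rw [hA, hB, heq]
    simp only []
    rw [hk0F]
    exact pvAux_first memb F te n j0 hj0n hmembj0 hminj (n + 1) 0 (by omega) (by omega)

-- ===== VERDICT (by name: the statement is the Claim_ definition above) =====
theorem rule2_for_find_ner_spec : Claim_equal_rule2_for_find_ner := by
  intro te q sub al _hdom hpre
  unfold Spec_rule2_for_find_ner
  exact rule2_core te q sub al hpre
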